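-- pv_equiv track=rewrite | github.com/lefarov/cp_playground | qualification_round/parenting_partnering_returns.py | recursive_assignment
-- ===== SOURCE A (Python) =====
-- def validate_assignment(task, schedule):
--     # Schedule is empty
--     if not schedule:
--         return 0
--     # Task can be assigned as the first
--     elif task[1] <= schedule[0][0]:
--         schedule = [task] + schedule
--         return 0
--     # Task can be assigned as the last one
--     elif task[0] >= schedule[-1][1]:
--         schedule = schedule + [task]
--         return 1
--     # Go trough all the tasks in a schedule
--     else:
--         # Insert task to the correct place
--         for i in range(len(schedule)):
--             if task[0] >= schedule[i][1] and task[1] <= schedule[i + 1][0]: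
--                 return i
--
--     return -1
--
-- def recursive_assignment(tasks, res, schedule_C, schedule_J):
--     # Scheduling is finished
--     if not tasks:
--         return True, res
--
--     # Assume invalid schedule for the beginning
--     success = False
--
--     # Try to assign task to C
--     idx = validate_assignment(tasks[0], schedule_C)
--     if idx != -1:
--         candidate_schedule_C = schedule_C.copy()
--         candidate_schedule_C.insert(idx, tasks[0])
--         success, res = recursive_assignment(tasks[1:], res + "C", candidate_schedule_C, schedule_J)
--
--     if success:
--         return True, res
--
--     # Try to assign task to C
--     idx = validate_assignment(tasks[0], schedule_J)
--     if idx != -1: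
--         candidate_schedule_J = schedule_J.copy()
--         candidate_schedule_J.insert(idx, tasks[0])
--         success, res = recursive_assignment(tasks[1:], res + "J", schedule_C, candidate_schedule_J)
--
--     if success:
--         return True, res
--
--     return False, res[:-1]
-- ===== SOURCE B (Python) =====
-- def _fit_index(task, schedule):
--     n = len(schedule)
--     if n == 0 or task[1] <= schedule[0][0]:
--         return 0
--     if task[0] >= schedule[-1][1]:
--         return 1
--     for i in range(n - 1):
--         if task[0] >= schedule[i][1] and task[1] <= schedule[i + 1][0]:
--             return i
--     return -1
--
--
-- def recursive_assignment(tasks, res, schedule_C, schedule_J):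
--     # Iterative depth-first search with an explicit stack (C-branch explored
--     # first); on total failure the answer is simply (False, res[:-1]).
--     stack = [(tasks, "", schedule_C, schedule_J)]
--     while stack:
--         todo, path, sc, sj = stack.pop()
--         if not todo:
--             return True, res + path
--         task, rest = todo[0], todo[1:]
--         ij = _fit_index(task, sj)
--         if ij != -1:
--             nj = sj.copy()
--             nj.insert(ij, task)
--             stack.append((rest, path + "J", sc, nj))
--         ic = _fit_index(task, sc)
--         if ic != -1:
--             nc = sc.copy()
--             nc.insert(ic, task)
--             stack.append((rest, path + "C", nc, sj))
--     return False, res[:-1]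
-- ===== Notes on version B (the rewrite author's own statement) =====
-- stated objective: alternative
-- what changed: The recursive backtracking with its cross-branch res threading is replaced by an iterative DFS over an explicit LIFO stack of frames that accumulates only the path, returning res+path on the first complete frame and (False, res[:-1]) when the stack empties (proved: the recursion's failure value is always res[:-1]); the fit-index helper scans adjacent pairs over range(n-1) instead of an out-of-bound-prone range(n).
import Mathlib
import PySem

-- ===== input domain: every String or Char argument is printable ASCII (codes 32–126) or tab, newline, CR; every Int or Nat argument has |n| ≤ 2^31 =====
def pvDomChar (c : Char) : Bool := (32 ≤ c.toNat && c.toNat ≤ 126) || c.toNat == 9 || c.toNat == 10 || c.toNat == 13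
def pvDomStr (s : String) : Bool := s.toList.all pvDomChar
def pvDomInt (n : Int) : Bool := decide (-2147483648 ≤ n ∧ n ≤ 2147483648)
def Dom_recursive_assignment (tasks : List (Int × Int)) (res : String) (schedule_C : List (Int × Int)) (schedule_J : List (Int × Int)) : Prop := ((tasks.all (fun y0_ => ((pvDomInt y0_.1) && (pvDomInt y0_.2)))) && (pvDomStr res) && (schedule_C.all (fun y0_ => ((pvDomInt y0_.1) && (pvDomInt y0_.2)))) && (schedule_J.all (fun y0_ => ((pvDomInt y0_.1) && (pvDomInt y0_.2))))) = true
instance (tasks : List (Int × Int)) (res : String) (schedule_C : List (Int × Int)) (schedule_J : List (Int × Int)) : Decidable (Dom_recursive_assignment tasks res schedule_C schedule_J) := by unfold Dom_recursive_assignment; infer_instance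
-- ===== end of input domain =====

-- B replaces the recursion (with its cross-branch `res` threading and per-level res[:-1] trim)
-- by an explicit-stack DFS that accumulates only the chosen path and returns (False, res[:-1])
-- when the stack empties; objective: alternative decomposition, same cost.

-- ===== PORT A =====
-- the for-loop of validate_assignment over range(len(schedule)); Python evaluates schedule[i+1]
-- only when task[0] >= schedule[i][1] holds (short-circuit `and`). The `none` case of
-- schedule[i+1] (where Python would raise IndexError) is unreachable: the loop runs only in the
-- final else-branch, where task[0] < schedule[-1][1] falsifies the first conjunct at i = len-1.
def vloopA (task : Int × Int) (sched : List (Int × Int)) : List Nat → Int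
  | [] => -1
  | i :: is =>
    if task.1 ≥ (sched.getD i (0, 0)).2 then
      match sched[i+1]? with
      | some nxt => if task.2 ≤ nxt.1 then (i : Int) else vloopA task sched is
      | none => vloopA task sched is
    else vloopA task sched is

-- schedule[i] with 0 ≤ i < len and schedule[-1] on a nonempty list: exact via getD / pyGetD
def validateA (task : Int × Int) (schedule : List (Int × Int)) : Int :=
  if schedule = [] then 0
  else if task.2 ≤ (PySem.List.pyGetD schedule 0 (0, 0)).1 then 0
  else if task.1 ≥ (PySem.List.pyGetD schedule (-1) (0, 0)).2 then 1
  else vloopA task schedule (List.range schedule.length)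

-- the recursion, on res as List Char (strings are ported on the toList side throughout)
def recA : List (Int × Int) → List Char → List (Int × Int) → List (Int × Int) → Bool × List Char
  | [], res, _, _ => (true, res)
  | t :: rest, res, sC, sJ =>
    let idxC := validateA t sC
    let p1 := if idxC ≠ -1 then recA rest (res ++ ['C']) (PySem.List.insert sC idxC t) sJ
              else (false, res)
    if p1.1 then (true, p1.2)
    else
      let idxJ := validateA t sJ
      let p2 := if idxJ ≠ -1 then recA rest (p1.2 ++ ['J']) sC (PySem.List.insert sJ idxJ t)
                else (false, p1.2)
      if p2.1 then (true, p2.2)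
      else (false, PySem.List.slice p2.2 none (some (-1)))

def recursive_assignment (tasks : List (Int × Int)) (res : String) (schedule_C : List (Int × Int)) (schedule_J : List (Int × Int)) : Bool × String :=
  let p := recA tasks res.toList schedule_C schedule_J
  (p.1, String.ofList p.2)

-- ===== PORT B =====
-- _fit_index's loop over range(n - 1): schedule[i] and schedule[i+1] are always in range, exact via getD
def fitLoopB (task : Int × Int) (sched : List (Int × Int)) : List Nat → Int
  | [] => -1
  | i :: is =>
    if task.1 ≥ (sched.getD i (0, 0)).2 ∧ task.2 ≤ (sched.getD (i+1) (0, 0)).1 then (i : Int)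
    else fitLoopB task sched is

def fitIndex (task : Int × Int) (schedule : List (Int × Int)) : Int :=
  if schedule.length = 0 ∨ task.2 ≤ (PySem.List.pyGetD schedule 0 (0, 0)).1 then 0
  else if task.1 ≥ (PySem.List.pyGetD schedule (-1) (0, 0)).2 then 1
  else fitLoopB task schedule (List.range (schedule.length - 1))

-- the while-loop over the explicit stack; head of the list = top of the stack, so pushing the
-- J-frame and then the C-frame means the popped order is C-frame first, as in Source B
def bLoop (res : List Char) : List (List (Int × Int) × List Char × List (Int × Int) × List (Int × Int)) → Bool × List Char
  | [] => (false, PySem.List.slice res none (some (-1)))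
  | (todo, path, sC, sJ) :: rest =>
    match todo with
    | [] => (true, res ++ path)
    | t :: ts =>
      bLoop res
        ((if fitIndex t sC ≠ -1 then [(ts, path ++ ['C'], PySem.List.insert sC (fitIndex t sC) t, sJ)] else []) ++
         (if fitIndex t sJ ≠ -1 then [(ts, path ++ ['J'], sC, PySem.List.insert sJ (fitIndex t sJ) t)] else []) ++ rest)
  termination_by stack => (stack.map (fun f => 3 ^ f.1.length)).sum
  decreasing_by
    have h3 : 0 < 3 ^ ts.length := pow_pos (by omega) _
    split_ifs <;> (simp [pow_succ]; try omega)

def recursive_assignment_alt (tasks : List (Int × Int)) (res : String) (schedule_C : List (Int × Int)) (schedule_J : List (Int × Int)) : Bool × String :=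
  let p := bLoop res.toList [(tasks, ([] : List Char), schedule_C, schedule_J)]
  (p.1, String.ofList p.2)

-- ===== PRECONDITION & SPEC =====
def Spec_recursive_assignment (tasks : List (Int × Int)) (res : String) (schedule_C : List (Int × Int)) (schedule_J : List (Int × Int)) (out : Bool × String) : Prop := out = recursive_assignment_alt tasks res schedule_C schedule_J
instance (tasks : List (Int × Int)) (res : String) (schedule_C : List (Int × Int)) (schedule_J : List (Int × Int)) (out : Bool × String) : Decidable (Spec_recursive_assignment tasks res schedule_C schedule_J out) := by unfold Spec_recursive_assignment; infer_instance

-- ===== CLAIM (what is proved, stated in full; the proofs are below) =====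
def Claim_equal_recursive_assignment : Prop := ∀ (tasks : List (Int × Int)) (res : String) (schedule_C : List (Int × Int)) (schedule_J : List (Int × Int)), Dom_recursive_assignment tasks res schedule_C schedule_J → Spec_recursive_assignment tasks res schedule_C schedule_J (recursive_assignment tasks res schedule_C schedule_J)

-- ===== LEMMAS AND PROOFS =====

-- the common search tree, as a pure function returning the successful path (if any)
def searchP : List (Int × Int) → List (Int × Int) → List (Int × Int) → Option (List Char)
  | [], _, _ => some []
  | t :: rest, sC, sJ =>
    match (if validateA t sC ≠ -1 then
             (searchP rest (PySem.List.insert sC (validateA t sC) t) sJ).map (fun p => 'C' :: p)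
           else none) with
    | some p => some p
    | none =>
      if validateA t sJ ≠ -1 then
        (searchP rest sC (PySem.List.insert sJ (validateA t sJ) t)).map (fun p => 'J' :: p)
      else none

def stackSearchP : List (List (Int × Int) × List Char × List (Int × Int) × List (Int × Int)) → Option (List Char)
  | [] => none
  | (todo, path, sC, sJ) :: rest =>
    match searchP todo sC sJ with
    | some p => some (path ++ p)
    | none => stackSearchP rest

theorem vloopA_append_last (task : Int × Int) (sched : List (Int × Int)) (j : Nat)
    (hj : sched[j+1]? = none) (is : List Nat) :
    vloopA task sched (is ++ [j]) = vloopA task sched is := by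
  induction is with
  | nil => simp [vloopA, hj]
  | cons i is ih => simp only [List.cons_append, vloopA, ih]

theorem vloopA_eq_fitLoopB (task : Int × Int) (sched : List (Int × Int)) (is : List Nat)
    (h : ∀ i ∈ is, i + 1 < sched.length) :
    vloopA task sched is = fitLoopB task sched is := by
  induction is with
  | nil => rfl
  | cons i is ih =>
    have hi : i + 1 < sched.length := h i (by simp)
    have hsome : sched[i+1]? = some sched[i+1] := List.getElem?_eq_getElem hi
    have hgetD : sched.getD (i+1) (0, 0) = sched[i+1] := by
      simp [List.getD_eq_getElem?_getD, hsome]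
    have ih' := ih (fun a ha => h a (List.mem_cons_of_mem _ ha))
    simp only [vloopA, fitLoopB, hsome, hgetD, ih']
    by_cases h1 : task.1 ≥ (sched.getD i (0, 0)).2 <;>
      by_cases h2 : task.2 ≤ sched[i+1].1 <;>
      simp [h2]

theorem validateA_eq_fitIndex (task : Int × Int) (sched : List (Int × Int)) :
    validateA task sched = fitIndex task sched := by
  rcases eq_or_ne sched [] with h | h
  · simp [validateA, fitIndex, h]
  · have hlen : 0 < sched.length := List.length_pos_iff.mpr h
    by_cases h1 : task.2 ≤ (PySem.List.pyGetD sched 0 (0, 0)).1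
    · simp [validateA, fitIndex, h, h1, List.length_eq_zero_iff]
    · by_cases h2 : task.1 ≥ (PySem.List.pyGetD sched (-1) (0, 0)).2
      · simp [validateA, fitIndex, h, h1, h2, List.length_eq_zero_iff]
      · simp only [validateA, fitIndex, List.length_eq_zero_iff, h, false_or,
          if_neg h1, if_neg h2]
        have hsplit : List.range sched.length = List.range (sched.length - 1) ++ [sched.length - 1] := by
          conv_lhs => rw [show sched.length = (sched.length - 1) + 1 by omega]
          exact List.range_succ
        rw [hsplit, vloopA_append_last task sched _ (List.getElem?_eq_none (by omega))]
        exact vloopA_eq_fitLoopB task sched _ (by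
          intro i hi
          have := List.mem_range.mp hi
          omega)

theorem recA_eq_searchP (tasks : List (Int × Int)) (res : List Char)
    (sC sJ : List (Int × Int)) :
    recA tasks res sC sJ =
      match searchP tasks sC sJ with
      | some p => (true, res ++ p)
      | none => (false, res.dropLast) := by
  induction tasks generalizing res sC sJ with
  | nil => simp [recA, searchP]
  | cons t rest ih =>
    simp only [recA, searchP]
    by_cases hC : validateA t sC ≠ -1
    · rw [if_pos hC, if_pos hC, ih]
      cases hsc : searchP rest (PySem.List.insert sC (validateA t sC) t) sJ with
      | some p => simp
      | none =>
        simp only [Option.map_none]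
        have htrim : (res ++ ['C']).dropLast = res := List.dropLast_concat ..
        by_cases hJ : validateA t sJ ≠ -1
        · rw [htrim]; simp only [if_pos hJ, ih]
          cases hsj : searchP rest sC (PySem.List.insert sJ (validateA t sJ) t) with
          | some p => simp
          | none => simp [PySem.List.slice_to_neg_one]
        · rw [htrim]
          simp [hJ, PySem.List.slice_to_neg_one]
    · rw [if_neg hC, if_neg hC]
      simp only []
      by_cases hJ : validateA t sJ ≠ -1
      · simp only [if_pos hJ, ih]
        cases hsj : searchP rest sC (PySem.List.insert sJ (validateA t sJ) t) with
        | some p => simp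
        | none => simp [PySem.List.slice_to_neg_one]
      · simp [hJ, PySem.List.slice_to_neg_one]

theorem stackSearchP_expand (t : Int × Int) (ts : List (Int × Int)) (path : List Char)
    (sC sJ : List (Int × Int))
    (rest : List (List (Int × Int) × List Char × List (Int × Int) × List (Int × Int))) :
    stackSearchP
      ((if fitIndex t sC ≠ -1 then [(ts, path ++ ['C'], PySem.List.insert sC (fitIndex t sC) t, sJ)] else []) ++
       (if fitIndex t sJ ≠ -1 then [(ts, path ++ ['J'], sC, PySem.List.insert sJ (fitIndex t sJ) t)] else []) ++ rest)
      = stackSearchP ((t :: ts, path, sC, sJ) :: rest) := by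
  rw [← validateA_eq_fitIndex t sC, ← validateA_eq_fitIndex t sJ]
  conv_rhs => rw [stackSearchP]
  simp only [searchP]
  by_cases h1 : validateA t sC ≠ -1
  · rw [if_pos h1, if_pos h1, List.singleton_append, List.cons_append]
    rw [stackSearchP]
    cases hA : searchP ts (PySem.List.insert sC (validateA t sC) t) sJ with
    | some p => simp [List.append_assoc]
    | none =>
      simp only [Option.map_none]
      by_cases h2 : validateA t sJ ≠ -1
      · rw [if_pos h2, if_pos h2, List.singleton_append]
        rw [stackSearchP]
        cases hB : searchP ts sC (PySem.List.insert sJ (validateA t sJ) t) with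
        | some p => simp [List.append_assoc]
        | none => simp
      · rw [if_neg h2, if_neg h2, List.nil_append]
  · rw [if_neg h1, if_neg h1, List.nil_append]
    by_cases h2 : validateA t sJ ≠ -1
    · rw [if_pos h2, if_pos h2, List.singleton_append]
      rw [stackSearchP]
      cases hB : searchP ts sC (PySem.List.insert sJ (validateA t sJ) t) with
      | some p => simp [List.append_assoc]
      | none => simp
    · rw [if_neg h2, if_neg h2, List.nil_append]

theorem bLoop_eq_stackSearchP (res : List Char)
    (stack : List (List (Int × Int) × List Char × List (Int × Int) × List (Int × Int))) :
    bLoop res stack =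
      match stackSearchP stack with
      | some p => (true, res ++ p)
      | none => (false, res.dropLast) := by
  induction stack using bLoop.induct with
  | case1 => simp [bLoop, stackSearchP, PySem.List.slice_to_neg_one]
  | case2 path sC sJ rest => simp [bLoop, stackSearchP, searchP]
  | case3 path sC sJ rest t ts ih =>
    rw [bLoop]
    simp only [dite_eq_ite] at ih
    rw [ih, stackSearchP_expand]

-- ===== VERDICT (by name: the statement is the Claim_ definition above) =====
theorem recursive_assignment_spec : Claim_equal_recursive_assignment := by
  intro tasks res sC sJ _
  unfold Spec_recursive_assignment recursive_assignment recursive_assignment_alt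
  rw [recA_eq_searchP, bLoop_eq_stackSearchP]
  simp only [stackSearchP]
  cases searchP tasks sC sJ <;> simp
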